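-- pv_equiv track=rewrite | github.com/jackakwan/ECE49022-Team30 | testpair.py | convert_sequence_to_characters
-- ===== SOURCE A (Python) =====
-- def convert_sequence_to_characters(sequence):
--     keypad_characters = {
--     '1': 'abc1', '2': 'def2', '3': 'ghi3',
--     '4': 'jkl4', '5': 'mno5', '6': 'pqrs6',
--     '7': 'tuv7', '8': 'wxyz8', '9': '9',
--     '0': '.,?0', '#': '!-_', '*': ''
-- }
--     converted_characters = ''
--
--     for chunkInd in range(len(sequence)):
--         current_char = None
--         count = 0
--         chunk = sequence[chunkInd]
--         if chunk == "#" and chunkInd != len(sequence):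
--             sequence[chunkInd+1] = '#'+sequence[chunkInd+1]
--
--
--         for digit in chunk:
--             if digit in keypad_characters and digit != "#":
--                 if digit == current_char:
--                     count = (count + 1) % len(keypad_characters[digit])
--                     if chunk[0] == "#":
--                         converted_characters = converted_characters[:-1] + keypad_characters[digit][count].upper()
--                     else:
--                         converted_characters = converted_characters[:-1] + keypad_characters[digit][count]
--                 else:
--                     current_char = digit
--                     count = 0
--                     if chunk[0] == "#":
--                         converted_characters += keypad_characters[digit][count].upper()
--                     else:
--                         converted_characters += keypad_characters[digit][count]
--
--     return converted_characters
-- ===== SOURCE B (Python) =====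
-- # B: run-length decomposition — filter each effective chunk to valid digits, collapse
-- # maximal runs, and emit keypad[d][(len-1) % cycle] per run; a carry flag replaces A's
-- # in-place '#' prepend into the sequence (return-value equivalence only: B does not
-- # mutate its argument).
-- def convert_sequence_to_characters(sequence):
--     keypad = {
--         '1': 'abc1', '2': 'def2', '3': 'ghi3',
--         '4': 'jkl4', '5': 'mno5', '6': 'pqrs6',
--         '7': 'tuv7', '8': 'wxyz8', '9': '9',
--         '0': '.,?0', '#': '!-_', '*': ''
--     }
--     out = []
--     carry = False
--     for chunk in sequence:
--         if carry:
--             chunk = '#' + chunk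
--         carry = (chunk == '#')
--         upper = chunk.startswith('#')
--         digits = [d for d in chunk if d in keypad and d != '#']
--         # run-length encode the remaining digits (skipped characters do not break runs)
--         runs = []
--         for d in digits:
--             if runs and runs[-1][0] == d:
--                 runs[-1][1] += 1
--             else:
--                 runs.append([d, 1])
--         for d, n in runs:
--             ch = keypad[d][(n - 1) % len(keypad[d])]
--             out.append(ch.upper() if upper else ch)
--     return ''.join(out)
-- ===== Notes on version B (the rewrite author's own statement) =====
-- stated objective: alternative
-- what changed: A's per-keypress state machine (current_char/count with rewrite-last-character string surgery and an in-place '#' prepend into the sequence list) is replaced by a per-chunk pipeline: a carry flag for the '#' prepend, filter to valid digits, run-length encode, and emit one character per run via the closed-form index (run_length-1) % cycle_length.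
import Mathlib
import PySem

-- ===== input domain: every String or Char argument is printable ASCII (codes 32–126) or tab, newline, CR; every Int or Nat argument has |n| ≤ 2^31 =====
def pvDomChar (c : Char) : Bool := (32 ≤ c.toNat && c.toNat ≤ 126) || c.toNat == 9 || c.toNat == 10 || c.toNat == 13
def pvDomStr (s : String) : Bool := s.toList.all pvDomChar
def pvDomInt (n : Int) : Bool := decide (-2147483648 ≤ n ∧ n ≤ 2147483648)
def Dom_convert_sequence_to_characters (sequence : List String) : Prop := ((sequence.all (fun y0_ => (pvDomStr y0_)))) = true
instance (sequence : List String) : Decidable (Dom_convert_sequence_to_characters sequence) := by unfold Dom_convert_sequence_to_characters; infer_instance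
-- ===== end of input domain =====

-- B replaces A's per-keypress rewrite-last-character accumulator by a run-length
-- decomposition (filter valid digits, collapse maximal runs, emit one character per run
-- by the closed-form index (len-1) % cycle) and a carry flag instead of A's in-place
-- '#' prepend into the sequence list.  A mutates its argument in place; B does not:
-- the equivalence proved here is about the RETURN value only.


-- ===== PORT A =====
-- the keypad dict literal (string values as char lists; exact on the ASCII domain)
def pvKeypad : List (Char × List Char) :=
  [('1', ['a','b','c','1']), ('2', ['d','e','f','2']), ('3', ['g','h','i','3']),
   ('4', ['j','k','l','4']), ('5', ['m','n','o','5']), ('6', ['p','q','r','s','6']),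
   ('7', ['t','u','v','7']), ('8', ['w','x','y','z','8']), ('9', ['9']),
   ('0', ['.',',','?','0']), ('#', ['!','-','_']), ('*', [])]

-- keypad_characters[digit] (first-match association-list lookup)
def pvKpGet? (d : Char) : Option (List Char) := (pvKeypad.find? (fun p => p.1 == d)).map (·.2)

-- the body of A's inner `for digit in chunk` loop; state = (current_char, count, converted).
-- `(count+1) % s.length` and `s.getD count ' '` are exact where Python returns (s nonempty,
-- i.e. digit ≠ '*'); Python raises there (IndexError/ZeroDivisionError) and Pre_ excludes it.
def pvStepA (chunk : List Char) (st : Option Char × Nat × List Char) (d : Char) :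
    Option Char × Nat × List Char :=
  match pvKpGet? d with
  | none => st
  | some s =>
    if d ≠ '#' then
      match st with
      | (cur, count, conv) =>
        if cur == some d then
          let count' := (count + 1) % s.length
          if chunk.headD ' ' == '#' then
            (some d, count', conv.dropLast ++ [PySem.Chars.upperChar (s.getD count' ' ')])
          else
            (some d, count', conv.dropLast ++ [s.getD count' ' '])
        else
          if chunk.headD ' ' == '#' then
            (some d, 0, conv ++ [PySem.Chars.upperChar (s.getD 0 ' ')])
          else
            (some d, 0, conv ++ [s.getD 0 ' '])
    else st

-- one iteration of A's `for chunkInd in range(len(sequence))` loop; state = (sequence, converted).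
-- `sequence[chunkInd+1] = '#'+sequence[chunkInd+1]` raises IndexError when chunkInd+1 is past
-- the end; Pre_ excludes exactly those inputs (set/getD are no-ops there).
def pvAStep (n : Nat) (st : List String × List Char) (i : Nat) : List String × List Char :=
  let seq := st.1
  let chunk := (seq.getD i "").toList
  let seq' := if chunk == ['#'] && decide (i ≠ n) then seq.set (i+1) ("#" ++ seq.getD (i+1) "") else seq
  (seq', (chunk.foldl (pvStepA chunk) (none, 0, st.2)).2.2)

def convert_sequence_to_characters (sequence : List String) : String :=
  String.mk ((List.range sequence.length).foldl (pvAStep sequence.length) (sequence, [])).2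

-- ===== PORT B =====
def pvValid (d : Char) : Bool := (pvKpGet? d).isSome && d != '#'

-- Source B's run-length encoding loop body (runs[-1][1] += 1 / runs.append([d,1]))
def pvRunsStep (runs : List (Char × Nat)) (d : Char) : List (Char × Nat) :=
  match runs.getLast? with
  | some (d', k) => if d' == d then runs.dropLast ++ [(d, k+1)] else runs ++ [(d, 1)]
  | none => runs ++ [(d, 1)]

def pvRuns (ds : List Char) : List (Char × Nat) := ds.foldl pvRunsStep []

-- keypad[d][(n-1) % len(keypad[d])], uppercased if the chunk's flag is set
def pvEmit (upper : Bool) (p : Char × Nat) : List Char :=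
  match pvKpGet? p.1 with
  | some s =>
    [if upper then PySem.Chars.upperChar (s.getD ((p.2 - 1) % s.length) ' ')
     else s.getD ((p.2 - 1) % s.length) ' ']
  | none => []

-- Source B's per-chunk work: filter to valid digits, RLE, emit one char per run
def pvChunkOut (chunk : List Char) : List Char :=
  (pvRuns (chunk.filter pvValid)).flatMap (pvEmit (PySem.Chars.startswith chunk ['#']))

-- Source B's loop body; state = (carry, out)
def pvBStep (st : Bool × List Char) (chunk0 : String) : Bool × List Char :=
  let chunk := if st.1 then '#' :: chunk0.toList else chunk0.toList
  (chunk == ['#'], st.2 ++ pvChunkOut chunk)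

def convert_sequence_to_characters_alt (sequence : List String) : String :=
  String.mk (sequence.foldl pvBStep (false, [])).2

-- ===== PRECONDITION & SPEC =====
-- length of the trailing run of "#" elements
def pvTrailSharp (r : List String) : Nat := (r.reverse.takeWhile (· == "#")).length

-- Pre_ excludes exactly the inputs on which A raises: a chunk containing '*'
-- (keypad['*'] is the empty string, so indexing it raises IndexError), or a sequence
-- whose trailing '#' cascade (a trailing run, ignoring empty chunks, of odd length —
-- '#' prepended onto a later '#' chunk yields "##" and stops the cascade) makes the
-- final effective chunk "#", so `sequence[chunkInd+1]` raises IndexError.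
def Pre_convert_sequence_to_characters (sequence : List String) : Prop :=
  (∀ c ∈ sequence, '*' ∉ c.toList) ∧
  pvTrailSharp (sequence.filter (· != "")) % 2 = 0
instance (sequence : List String) : Decidable (Pre_convert_sequence_to_characters sequence) := by
  unfold Pre_convert_sequence_to_characters; infer_instance

def pvWitness_convert_sequence_to_characters : List String := ["23", "#", "2"]

def Spec_convert_sequence_to_characters (sequence : List String) (out : String) : Prop := out = convert_sequence_to_characters_alt sequence
instance (sequence : List String) (out : String) : Decidable (Spec_convert_sequence_to_characters sequence out) := by unfold Spec_convert_sequence_to_characters; infer_instance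

-- ===== CLAIM (what is proved, stated in full; the proofs are below) =====
def Claim_equal_convert_sequence_to_characters : Prop := ∀ (sequence : List String), Dom_convert_sequence_to_characters sequence → Pre_convert_sequence_to_characters sequence → Spec_convert_sequence_to_characters sequence (convert_sequence_to_characters sequence)

-- ===== LEMMAS AND PROOFS =====

-- `startswith chunk "#"` is a head test
theorem pv_sw (l : List Char) : PySem.Chars.startswith l ['#'] = (l.headD ' ' == '#') := by
  cases l <;> simp [PySem.Chars.startswith, List.isPrefixOf, eq_comm]

-- invalid digits are no-ops for A's inner loop
theorem pv_stepA_invalid (chunk : List Char) (st : Option Char × Nat × List Char) (d : Char)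
    (h : pvValid d = false) : pvStepA chunk st d = st := by
  unfold pvStepA
  unfold pvValid at h
  cases hk : pvKpGet? d with
  | none => rfl
  | some s =>
    simp [hk] at h
    simp [h]

theorem pv_foldl_filter (chunk : List Char) (l : List Char) (st : Option Char × Nat × List Char) :
    l.foldl (pvStepA chunk) st = (l.filter pvValid).foldl (pvStepA chunk) st := by
  induction l generalizing st with
  | nil => rfl
  | cons d l ih =>
    by_cases h : pvValid d = true
    · simp [h, ih]
    · simp only [Bool.not_eq_true] at h
      simp [h, ih, pv_stepA_invalid _ _ _ h]

-- every valid non-'*' digit has a nonempty keypad entry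
theorem pv_goodChar (d : Char) (hv : pvValid d = true) (hs : d ≠ '*') :
    ∃ s, pvKpGet? d = some s ∧ 0 < s.length := by
  unfold pvValid at hv
  unfold pvKpGet? pvKeypad at hv ⊢
  simp only [List.find?] at hv ⊢
  repeat' split at hv
  all_goals
    first
    | (rename_i h; simp only [beq_iff_eq] at h; subst h;
       first
       | exact ⟨_, rfl, by decide⟩
       | exact absurd rfl hs)
    | simp at hv

-- invariant of Source B's RLE: run digits come from the list, counts are ≥ 1
theorem pv_runs_inv (ds : List Char) (p : Char × Nat) (hp : p ∈ pvRuns ds) :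
    p.1 ∈ ds ∧ 1 ≤ p.2 := by
  induction ds using List.reverseRecOn generalizing p with
  | nil => simp [pvRuns] at hp
  | append_singleton ds d ih =>
    unfold pvRuns at hp
    rw [List.foldl_append] at hp
    simp only [List.foldl_cons, List.foldl_nil] at hp
    unfold pvRunsStep at hp
    split at hp
    next d' k heq =>
      split at hp
      all_goals rcases List.mem_append.1 hp with hm | hm
      · have := ih p ((List.dropLast_sublist _).mem hm)
        exact ⟨List.mem_append_left _ this.1, this.2⟩
      · simp at hm; subst hm; exact ⟨by simp, by omega⟩
      · have := ih p hm
        exact ⟨List.mem_append_left _ this.1, this.2⟩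
      · simp at hm; subst hm; exact ⟨by simp, by omega⟩
    next heq =>
      rcases List.mem_append.1 hp with hm | hm
      · have := ih p hm
        exact ⟨List.mem_append_left _ this.1, this.2⟩
      · simp at hm; subst hm; exact ⟨by simp, by omega⟩

-- A's inner state after a valid digit list = B's run-length description
def pvLen (d : Char) : Nat := ((pvKpGet? d).getD []).length

def pvStateOf (u : Bool) (runs : List (Char × Nat)) (conv : List Char) :
    Option Char × Nat × List Char :=
  match runs.getLast? with
  | none => (none, 0, conv)
  | some (d, k) => (some d, (k - 1) % pvLen d, conv ++ runs.flatMap (pvEmit u))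

theorem pv_LR (chunk : List Char) (ds : List Char)
    (h : ∀ d ∈ ds, pvValid d = true ∧ d ≠ '*') (conv : List Char) :
    ds.foldl (pvStepA chunk) (none, 0, conv)
      = pvStateOf (chunk.headD ' ' == '#') (pvRuns ds) conv := by
  induction ds using List.reverseRecOn generalizing conv with
  | nil => simp [pvRuns, pvStateOf]
  | append_singleton ds d ih =>
    have hd := h d (by simp)
    have hds : ∀ x ∈ ds, pvValid x = true ∧ x ≠ '*' := fun x hx => h x (by simp [hx])
    obtain ⟨s, hks, hlen⟩ := pv_goodChar d hd.1 hd.2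
    have hdne : d ≠ '#' := by
      have hv := hd.1; unfold pvValid at hv; simp at hv; exact hv.2
    have hruns : pvRuns (ds ++ [d]) = pvRunsStep (pvRuns ds) d := by
      unfold pvRuns; rw [List.foldl_append]; rfl
    rw [List.foldl_append, ih hds]
    simp only [List.foldl_cons, List.foldl_nil, hruns]
    unfold pvRunsStep
    cases hl : (pvRuns ds).getLast? with
    | none =>
      have hnil : pvRuns ds = [] := List.getLast?_eq_none_iff.1 hl
      rw [hnil]
      unfold pvStateOf
      simp only [List.getLast?_nil]
      unfold pvStepA
      rw [hks]
      cases hu : (chunk.headD ' ' == '#') <;>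
        simp [hu, pvEmit, pvLen, hks, hdne]
    | some p =>
      obtain ⟨d', k⟩ := p
      have hmem : (d', k) ∈ pvRuns ds := List.mem_of_getLast? hl
      have hinv := pv_runs_inv ds _ hmem
      obtain ⟨s', hks', hlen'⟩ := pv_goodChar d' (hds d' hinv.1).1 (hds d' hinv.1).2
      have hsplit : (pvRuns ds).dropLast ++ [(d', k)] = pvRuns ds :=
        List.dropLast_append_getLast? _ (by simp [hl])
      unfold pvStateOf
      simp only [hl]
      unfold pvStepA
      rw [hks]
      simp only [if_pos hdne]
      by_cases hdd : d' = d
      · subst hdd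
        -- same digit: the rewrite-last-character branch extends the last run
        have hseq : s' = s := by rw [hks] at hks'; exact (Option.some_inj.1 hks').symm
        subst hseq
        have hLd : pvLen d' = s'.length := by simp [pvLen, hks]
        have hmod : ((k - 1) % s'.length + 1) % s'.length = k % s'.length := by
          rw [Nat.mod_add_mod, Nat.sub_add_cancel hinv.2]
        have hflat : List.flatMap (pvEmit (chunk.headD ' ' == '#')) (pvRuns ds)
            = List.flatMap (pvEmit (chunk.headD ' ' == '#')) (pvRuns ds).dropLast
              ++ pvEmit (chunk.headD ' ' == '#') (d', k) := by
          rw [← hsplit, List.flatMap_append]; simp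
        have hlast2 : ((pvRuns ds).dropLast ++ [(d', k + 1)]).getLast? = some (d', k+1) :=
          List.getLast?_concat
        simp only [beq_self_eq_true, if_pos, hlast2, hLd]
        cases hu : (chunk.headD ' ' == '#') <;>
          (rw [hu] at hflat;
           simp [hu, hflat, pvEmit, hks, hmod, ← List.append_assoc])
      · -- different digit: a fresh run starts
        have hbe : (d' == d) = false := by simp [hdd]
        have hlast2 : (pvRuns ds ++ [(d, 1)]).getLast? = some (d, 1) := List.getLast?_concat
        simp only [hbe, Option.some_beq_some, hlast2]
        cases hu : (chunk.headD ' ' == '#') <;>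
          simp [hu, pvEmit, hks, pvLen, List.flatMap_append, ← List.append_assoc]

-- A's inner loop over a '*'-free chunk appends exactly B's per-chunk output
theorem pv_inner (chunk : List Char) (conv : List Char) (hs : '*' ∉ chunk) :
    (chunk.foldl (pvStepA chunk) (none, 0, conv)).2.2 = conv ++ pvChunkOut chunk := by
  rw [pv_foldl_filter]
  have h : ∀ d ∈ chunk.filter pvValid, pvValid d = true ∧ d ≠ '*' := by
    intro d hd
    rcases List.mem_filter.1 hd with ⟨hm, hv⟩
    exact ⟨hv, fun e => hs (e ▸ hm)⟩
  rw [pv_LR chunk _ h conv]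
  unfold pvChunkOut
  rw [pv_sw]
  unfold pvStateOf
  cases hl : (pvRuns (chunk.filter pvValid)).getLast? with
  | none =>
    have hnil : pvRuns (chunk.filter pvValid) = [] := List.getLast?_eq_none_iff.1 hl
    simp [hnil]
  | some p => obtain ⟨d, k⟩ := p; simp

-- B's fold, unrolled structurally with the carry
def pvBeff : Bool → List String → List Char
  | _, [] => []
  | carry, c :: cs =>
    pvChunkOut (if carry then "#" ++ c else c).toList ++
      pvBeff ((if carry then "#" ++ c else c) == "#") cs

theorem pv_LB (l : List String) (carry : Bool) (acc : List Char) :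
    (l.foldl pvBStep (carry, acc)).2 = acc ++ pvBeff carry l := by
  induction l generalizing carry acc with
  | nil => simp [pvBeff]
  | cons c cs ih =>
    have hsharp : (((if carry then "#" ++ c else c).toList == ['#']))
        = ((if carry then "#" ++ c else c) == "#") := by
      rcases eq_or_ne (if carry then "#" ++ c else c) "#" with he | he
      · simp [he]
      · rw [beq_eq_false_iff_ne.2 he, beq_eq_false_iff_ne.2
          (fun hh => he (String.toList_inj.1 (by simpa using hh)))]
    have hstep : pvBStep (carry, acc) c
        = (((if carry then "#" ++ c else c) == "#"),
           acc ++ pvChunkOut (if carry then "#" ++ c else c).toList) := by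
      unfold pvBStep
      have hchunk : (if carry then '#' :: c.toList else c.toList)
          = (if carry then "#" ++ c else c).toList := by
        cases carry <;> simp [String.toList_append]
      simp only [hchunk, hsharp]
    rw [List.foldl_cons, hstep, ih]
    conv_rhs => rw [pvBeff]
    rw [List.append_assoc]

-- the closed-form "A does not raise" condition, threaded through the loop
def pvGood : Bool → List String → Prop
  | _, [] => True
  | carry, c :: cs =>
    ('*' ∉ (if carry then "#" ++ c else c).toList) ∧
    ((if carry then "#" ++ c else c) = "#" → cs ≠ []) ∧
    pvGood ((if carry then "#" ++ c else c) == "#") cs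

-- A's mutated suffix, with the pending '#' prepend applied
def pvAC (carry : Bool) (l : List String) : List String :=
  match carry, l with
  | true, x :: xs => ("#" ++ x) :: xs
  | _, l => l

theorem pv_LA (n : Nat) (rest pre : List String) (conv : List Char) (carry : Bool)
    (hg : pvGood carry rest) (hn : n = pre.length + rest.length) :
    ((List.range' pre.length rest.length).foldl (pvAStep n) (pre ++ pvAC carry rest, conv)).2
      = conv ++ pvBeff carry rest := by
  induction rest generalizing pre conv carry with
  | nil =>
    cases carry <;> simp [pvAC, pvBeff]
  | cons c cs ih =>
    have hAC : pvAC carry (c :: cs) = (if carry then "#" ++ c else c) :: cs := by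
      cases carry <;> rfl
    rw [hAC]
    rw [pvGood] at hg
    obtain ⟨hg1, hg2, hg3⟩ := hg
    set e : String := if carry then "#" ++ c else c with hedef
    have hlen : (List.range' pre.length (c :: cs).length) = pre.length :: List.range' (pre.length + 1) cs.length := by
      simp [List.range'_succ]
    rw [hlen, List.foldl_cons]
    have hget : (pre ++ e :: cs).getD pre.length "" = e := by
      simp [List.getD]
    have hne : (decide (pre.length ≠ n)) = true := by
      simp at hn ⊢; omega
    have hconv : ((e.toList).foldl (pvStepA e.toList) (none, 0, conv)).2.2
        = conv ++ pvChunkOut e.toList := pv_inner _ _ hg1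
    have hsharp : ((e.toList == ['#'])) = (e == "#") := by
      rcases eq_or_ne e "#" with he | he
      · simp [he]
      · rw [beq_eq_false_iff_ne.2 he, beq_eq_false_iff_ne.2
          (fun hh => he (String.toList_inj.1 (by simpa using hh)))]
    have hstep : pvAStep n (pre ++ e :: cs, conv) pre.length
        = ((pre ++ [e]) ++ pvAC (e == "#") cs, conv ++ pvChunkOut e.toList) := by
      unfold pvAStep
      simp only [hget, hne, Bool.and_true, hconv, hsharp]
      congr 1
      rcases eq_or_ne e "#" with he | he
      · obtain ⟨x, xs, rfl⟩ : ∃ x xs, cs = x :: xs := by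
          rcases cs with _ | ⟨x, xs⟩
          · exact absurd rfl (hg2 he)
          · exact ⟨x, xs, rfl⟩
        have hget2 : (pre ++ e :: x :: xs).getD (pre.length + 1) "" = x := by
          have : pre ++ e :: x :: xs = (pre ++ [e]) ++ x :: xs := by simp
          rw [this]
          have hl1 : pre.length + 1 = (pre ++ [e]).length := by simp
          rw [List.getD_eq_getElem?_getD, hl1, List.getElem?_append_right (le_refl _)]
          simp
        have hset : (pre ++ e :: x :: xs).set (pre.length + 1) ("#" ++ x)
            = (pre ++ [e]) ++ ("#" ++ x) :: xs := by
          have h2 : pre ++ e :: x :: xs = (pre ++ [e]) ++ x :: xs := by simp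
          rw [h2]
          have hl1 : (pre ++ [e]).length = pre.length + 1 := by simp
          rw [← hl1, List.set_append]
          simp
        rw [if_pos (by simp [he]), hget2, hset]
        simp [pvAC, he]
      · rw [if_neg (by simp [he])]
        simp [pvAC, beq_eq_false_iff_ne.2 he]
    rw [hstep]
    have hlen2 : pre.length + 1 = ((pre ++ [e])).length := by simp
    rw [hlen2, ih (pre ++ [e]) (conv ++ pvChunkOut e.toList) (e == "#") hg3 (by simp at hn ⊢; omega)]
    conv_rhs => rw [pvBeff]
    rw [← hedef, List.append_assoc]

-- trailing-'#'-run bookkeeping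
theorem pv_trail_all (x : List String) (h : x.all (· == "#") = true) :
    pvTrailSharp x = x.length := by
  unfold pvTrailSharp
  rw [List.takeWhile_eq_self_iff.2
    (fun a ha => (List.all_eq_true.1 h) a (List.mem_reverse.1 ha)), List.length_reverse]

theorem pv_trail_cons (c : String) (x : List String) :
    pvTrailSharp (c :: x)
      = if c = "#" ∧ x.all (· == "#") = true then x.length + 1 else pvTrailSharp x := by
  unfold pvTrailSharp
  rw [List.reverse_cons, List.takeWhile_append]
  have hiff : ((List.takeWhile (· == "#") x.reverse).length = x.reverse.length)
      ↔ x.all (· == "#") = true := by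
    constructor
    · intro hl
      have heq := (List.takeWhile_prefix (p := (· == "#")) (l := x.reverse)).eq_of_length
        (by simpa using hl)
      have := List.takeWhile_eq_self_iff.1 heq
      exact List.all_eq_true.2 (fun a ha => this a (List.mem_reverse.2 ha))
    · intro ha
      rw [List.takeWhile_eq_self_iff.2
        (fun a hb => (List.all_eq_true.1 ha) a (List.mem_reverse.1 hb))]
  by_cases hall : x.all (· == "#") = true
  · rw [if_pos (hiff.2 hall)]
    by_cases hc : c = "#"
    · rw [if_pos ⟨hc, hall⟩]
      simp [hc]
    · rw [if_neg (fun h => hc h.1)]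
      have : List.takeWhile (· == "#") [c] = [] := by
        simp [List.takeWhile, beq_eq_false_iff_ne.2 hc]
      rw [this]
      rw [List.takeWhile_eq_self_iff.2
        (fun a hb => (List.all_eq_true.1 hall) a (List.mem_reverse.1 hb))]
      simp
  · rw [if_neg (fun h => hall (hiff.1 h)), if_neg (fun h => hall h.2)]

theorem pv_goodOf (l : List String) (carry : Bool)
    (hstar : ∀ c ∈ l, '*' ∉ c.toList)
    (hpar : pvTrailSharp ((if carry then ("#" :: l) else l).filter (· != "")) % 2 = 0) :
    pvGood carry l := by
  induction l generalizing carry with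
  | nil => rw [pvGood]; trivial
  | cons c cs ih =>
    have hstar_c := hstar c (by simp)
    have hstar_cs : ∀ a ∈ cs, '*' ∉ a.toList := fun a ha => hstar a (by simp [ha])
    have hsharpcat : ∀ (a : String), ("#" ++ a = "#") ↔ a = "" := by
      intro a
      constructor
      · intro hh
        have h2 := String.toList_inj.2 hh
        rw [String.toList_append] at h2
        simp at h2
        exact String.toList_inj.1 (by simpa using h2)
      · intro hh; rw [hh]; rfl
    have hesharp : (if carry then "#" ++ c else c) = "#" ↔
        ((carry = true ∧ c = "") ∨ (carry = false ∧ c = "#")) := by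
      cases carry
      · simp
      · simp [hsharpcat c]
    rw [pvGood]
    refine ⟨?_, ?_, ?_⟩
    · cases carry <;> simp [String.toList_append] <;> simpa using hstar_c
    · intro he hcs
      subst hcs
      rcases hesharp.1 he with ⟨hc, hc2⟩ | ⟨hc, hc2⟩ <;> subst hc2 <;> subst hc <;>
        simp [pvTrailSharp, List.filter, List.takeWhile] at hpar
    · apply ih _ hstar_cs
      by_cases he : (if carry then "#" ++ c else c) = "#"
      · rw [if_pos (by simp [he])]
        rcases hesharp.1 he with ⟨hc, hc2⟩ | ⟨hc, hc2⟩ <;> subst hc2 <;> subst hc <;>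
          simpa [List.filter_cons] using hpar
      · rw [if_neg (by simp [he])]
        cases carry with
        | false =>
          simp only [Bool.false_eq_true, if_false] at hpar
          have hcsharp : c ≠ "#" := by simpa using (hesharp.not.1 he)
          by_cases hc0 : c = ""
          · subst hc0; simpa [List.filter_cons] using hpar
          · rw [List.filter_cons, if_pos (by simpa using hc0)] at hpar
            rw [pv_trail_cons] at hpar
            rw [if_neg (fun h => hcsharp h.1)] at hpar
            exact hpar
        | true =>
          simp only [if_true] at hpar
          have hc0 : c ≠ "" := by
            intro h; exact he (by simp [h])
          rw [List.filter_cons, if_pos (by simp), List.filter_cons,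
            if_pos (by simpa using hc0)] at hpar
          by_cases hcsharp : c = "#"
          · subst hcsharp
            rw [pv_trail_cons] at hpar
            by_cases hall : (("#" :: cs.filter (· != ""))).all (· == "#") = true
            · rw [if_pos ⟨rfl, hall⟩] at hpar
              have hallF : (cs.filter (· != "")).all (· == "#") = true := by
                simpa using hall
              rw [pv_trail_all _ hallF]
              simp at hpar ⊢
              omega
            · rw [if_neg (fun h => hall h.2)] at hpar
              rw [pv_trail_cons, if_neg (fun h => hall (by simp [h.2]))] at hpar
              exact hpar
          · rw [pv_trail_cons, if_neg (fun h => by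
               have := h.2; simp at this; exact hcsharp this.1)] at hpar
            rw [pv_trail_cons, if_neg (fun h => hcsharp h.1)] at hpar
            exact hpar

-- ===== VERDICT (by name: the statement is the Claim_ definition above) =====
theorem convert_sequence_to_characters_spec : Claim_equal_convert_sequence_to_characters := by
  intro seq _ hpre
  unfold Spec_convert_sequence_to_characters
  unfold convert_sequence_to_characters convert_sequence_to_characters_alt
  obtain ⟨h1, h2⟩ := hpre
  have hg := pv_goodOf seq false h1 (by simpa using h2)
  have hA := pv_LA seq.length seq [] [] false hg (by simp)
  have hB := pv_LB seq false []
  simp [pvAC] at hA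
  rw [List.range_eq_range']
  simp at hA hB ⊢
  rw [hA, hB]
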